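-- pv_equiv track=rewrite | github.com/yemingx/domain_expert | backend/literature_research/scripts/download_pdfs.py | attach_pdf_paths_to_papers
-- ===== SOURCE A (Python) =====
-- def attach_pdf_paths_to_papers(papers: list[dict], download_results: list[dict]) -> list[dict]:
--     """将下载结果附加回 papers 列表。"""
--     result_map = {
--         (r.get("doi", ""), r.get("pmid", "")): r
--         for r in download_results
--     }
--     for paper in papers:
--         key = (paper.get("doi", ""), paper.get("pmid", ""))
--         res = result_map.get(key)
--         if res:
--             paper["pdf_path"] = res.get("pdf_path")
--             paper["pdf_status"] = res.get("status")
--             paper["pdf_source"] = res.get("source")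
--     return papers
-- ===== SOURCE B (Python) =====
-- def attach_pdf_paths_to_papers(papers: list[dict], download_results: list[dict]) -> list[dict]:
--     """将下载结果附加回 papers 列表。(in-place, like the original)"""
--     for paper in papers:
--         key = (paper.get("doi", ""), paper.get("pmid", ""))
--         match = None
--         for r in download_results:
--             if (r.get("doi", ""), r.get("pmid", "")) == key:
--                 match = r  # later matches overwrite: dict last-wins semantics
--         if match:
--             paper["pdf_path"] = match.get("pdf_path")
--             paper["pdf_status"] = match.get("status")
--             paper["pdf_source"] = match.get("source")
--     return papers
-- ===== Notes on version B (the rewrite author's own statement) =====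
-- stated objective: alternative
-- what changed: Drops the precomputed result_map dict: for each paper B scans download_results directly, keeping the last record whose (doi, pmid) key matches (reproducing dict last-wins), and applies the update from that record if it is truthy.
import Mathlib
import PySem

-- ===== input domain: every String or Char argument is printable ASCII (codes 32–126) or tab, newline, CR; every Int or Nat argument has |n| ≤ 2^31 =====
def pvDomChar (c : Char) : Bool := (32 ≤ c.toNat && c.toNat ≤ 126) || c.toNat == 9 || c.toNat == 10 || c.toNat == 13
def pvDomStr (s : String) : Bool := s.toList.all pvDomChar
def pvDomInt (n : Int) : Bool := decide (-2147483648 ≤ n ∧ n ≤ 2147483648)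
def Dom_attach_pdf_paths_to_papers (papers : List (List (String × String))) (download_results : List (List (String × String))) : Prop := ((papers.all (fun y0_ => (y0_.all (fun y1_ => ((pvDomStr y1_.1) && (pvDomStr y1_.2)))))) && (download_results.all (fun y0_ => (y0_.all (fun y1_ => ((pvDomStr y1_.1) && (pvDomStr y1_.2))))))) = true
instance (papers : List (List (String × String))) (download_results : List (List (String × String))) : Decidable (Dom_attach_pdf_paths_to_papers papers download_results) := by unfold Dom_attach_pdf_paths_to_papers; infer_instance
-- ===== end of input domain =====

-- B replaces A's precomputed result_map dict by a direct last-match scan of download_results per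
-- paper (an organizational alternative, not a speed-up). Both versions mutate `papers` in place in
-- Python; the equivalence proved here is about the returned value.

-- (doi, pmid) key of a record, as both Python versions compute it: r.get("doi",""), r.get("pmid","")
def pvKey (d : PySem.Dict String String) : String × String := (d.getD "doi" "", d.getD "pmid" "")

-- the three-field update both versions perform; res.get("pdf_path") etc. is Python None when the key
-- is missing (not a String) — exactly those inputs are excluded by Pre_, so getD "" is exact on Pre_
def pvUpdate (p res : PySem.Dict String String) : List (String × String) :=
  (((p.insert "pdf_path" (res.getD "pdf_path" "")).insert "pdf_status" (res.getD "status" "")).insert "pdf_source" (res.getD "source" "")).items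

-- ===== PORT A =====
def attach_pdf_paths_to_papers (papers : List (List (String × String))) (download_results : List (List (String × String))) : List (List (String × String)) :=
  -- result_map = {(r.get("doi",""), r.get("pmid","")): r for r in download_results}
  let result_map : PySem.Dict (String × String) (PySem.Dict String String) :=
    download_results.foldl (fun m r => m.insert (pvKey (PySem.Dict.ofList r)) (PySem.Dict.ofList r)) PySem.Dict.empty
  papers.map (fun paper =>
    let p := PySem.Dict.ofList paper
    match result_map.get? (pvKey p) with
    | some res => if res.size ≠ 0 then pvUpdate p res else p.items   -- `if res:` (None or {} falsy)
    | none => p.items)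

-- ===== PORT B =====
def attach_pdf_paths_to_papers_alt (papers : List (List (String × String))) (download_results : List (List (String × String))) : List (List (String × String)) :=
  papers.map (fun paper =>
    let p := PySem.Dict.ofList paper
    let key := pvKey p
    -- match = None; for r in download_results: if key(r) == key: match = r   (last match wins)
    let m : Option (PySem.Dict String String) :=
      download_results.foldl
        (fun acc r => if pvKey (PySem.Dict.ofList r) = key then some (PySem.Dict.ofList r) else acc) none
    match m with
    | some res => if res.size ≠ 0 then pvUpdate p res else p.items   -- `if match:`
    | none => p.items)

-- ===== PRECONDITION & SPEC =====
-- Pre_ excludes inputs on which A (and B) write Python None — not a String — into a paper dict: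
-- those where the last download result matching some paper's (doi, pmid) key is non-empty but lacks
-- one of the keys "pdf_path"/"status"/"source".
def Pre_attach_pdf_paths_to_papers (papers : List (List (String × String))) (download_results : List (List (String × String))) : Prop :=
  (papers.all (fun p =>
    match (download_results.filter (fun r' => pvKey (PySem.Dict.ofList r') == pvKey (PySem.Dict.ofList p))).getLast? with
    | some r => r.isEmpty
        || ((r.map Prod.fst).contains "pdf_path" && (r.map Prod.fst).contains "status" && (r.map Prod.fst).contains "source")
    | none => true)) = true
instance (papers : List (List (String × String))) (download_results : List (List (String × String))) : Decidable (Pre_attach_pdf_paths_to_papers papers download_results) := by unfold Pre_attach_pdf_paths_to_papers; infer_instance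

def pvWitness_attach_pdf_paths_to_papers : (List (List (String × String))) × (List (List (String × String))) :=
  ([[("doi", "d")], [("pmid", "7")]],
   [[("doi", "d"), ("pdf_path", "p.pdf"), ("status", "ok"), ("source", "unpaywall")]])

def Spec_attach_pdf_paths_to_papers (papers : List (List (String × String))) (download_results : List (List (String × String))) (out : List (List (String × String))) : Prop := out = attach_pdf_paths_to_papers_alt papers download_results
instance (papers : List (List (String × String))) (download_results : List (List (String × String))) (out : List (List (String × String))) : Decidable (Spec_attach_pdf_paths_to_papers papers download_results out) := by unfold Spec_attach_pdf_paths_to_papers; infer_instance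

-- ===== CLAIM (what is proved, stated in full; the proofs are below) =====
def Claim_equal_attach_pdf_paths_to_papers : Prop := ∀ (papers : List (List (String × String))) (download_results : List (List (String × String))), Dom_attach_pdf_paths_to_papers papers download_results → Pre_attach_pdf_paths_to_papers papers download_results → Spec_attach_pdf_paths_to_papers papers download_results (attach_pdf_paths_to_papers papers download_results)

-- ===== LEMMAS AND PROOFS =====

-- A's dict build + lookup is B's last-match scan: looking up k in the dict folded from `results`
-- returns the last record of `results` whose key equals k (or the fallback lookup in the start dict).
lemma pv_get?_foldl_insert_eq_scan
    (results : List (List (String × String)))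
    (m0 : PySem.Dict (String × String) (PySem.Dict String String)) (k : String × String) :
    (results.foldl (fun m r => m.insert (pvKey (PySem.Dict.ofList r)) (PySem.Dict.ofList r)) m0).get? k
      = results.foldl
          (fun acc r => if pvKey (PySem.Dict.ofList r) = k then some (PySem.Dict.ofList r) else acc)
          (m0.get? k) := by
  induction results generalizing m0 with
  | nil => rfl
  | cons r rest ih =>
    simp only [List.foldl_cons]
    rw [ih, PySem.Dict.get?_insert]
    by_cases h : pvKey (PySem.Dict.ofList r) = k
    · simp [h]
    · rw [if_neg (fun hh => h hh.symm), if_neg h]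

theorem attach_pdf_paths_to_papers_spec_aux (papers download_results : List (List (String × String))) :
    attach_pdf_paths_to_papers papers download_results
      = attach_pdf_paths_to_papers_alt papers download_results := by
  unfold attach_pdf_paths_to_papers attach_pdf_paths_to_papers_alt
  refine List.map_congr_left (fun paper _ => ?_)
  simp only [pv_get?_foldl_insert_eq_scan, PySem.Dict.get?_empty]

-- ===== VERDICT (by name: the statement is the Claim_ definition above) =====
theorem attach_pdf_paths_to_papers_spec : Claim_equal_attach_pdf_paths_to_papers := by
  intro papers download_results _ _
  exact attach_pdf_paths_to_papers_spec_aux papers download_results
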